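-- pv_equiv track=rewrite | github.com/dead-pool-kit/CSE-545-final-project | main.py | sanitised
-- ===== SOURCE A (Python) =====
-- def sanitised(col):
--     originals = {}
--     replace_dict = {'%': 'percent', '(': '', ')': '', ',': '', ':': '', '-': '', '$': 'D', '.': '', '/': '', '=': '', '&': '', ' ': '_', '"': ''}
--
--     for i, attribute in enumerate(col):
--         original = attribute
--         for key in replace_dict:
--             attribute = attribute.replace(key, replace_dict[key])
--         col[i] = attribute
--         originals[attribute] = original
--
--         return col[0], col[1:], originals
-- ===== SOURCE B (Python) =====
-- def sanitised(col):
--     original = col[0]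
--     out = []
--     for c in original:
--         if c == '%':
--             out.append('percent')
--         elif c == '$':
--             out.append('D')
--         elif c == ' ':
--             out.append('_')
--         elif c in '(),:-./=&"':
--             pass
--         else:
--             out.append(c)
--     sanitized = ''.join(out)
--     col[0] = sanitized
--     return col[0], col[1:], {sanitized: original}
-- ===== Notes on version B (the rewrite author's own statement) =====
-- stated objective: alternative
-- what changed: A sanitises col[0] by 13 sequential full-string str.replace passes driven by a dict; B makes one explicit loop over the characters with an if/elif chain appending the replacement pieces to an accumulator list and joins them once, building the returned tuple directly.
-- outside the precondition, e.g. on sanitised([]): A returns None, B raises IndexError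
import Mathlib
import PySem

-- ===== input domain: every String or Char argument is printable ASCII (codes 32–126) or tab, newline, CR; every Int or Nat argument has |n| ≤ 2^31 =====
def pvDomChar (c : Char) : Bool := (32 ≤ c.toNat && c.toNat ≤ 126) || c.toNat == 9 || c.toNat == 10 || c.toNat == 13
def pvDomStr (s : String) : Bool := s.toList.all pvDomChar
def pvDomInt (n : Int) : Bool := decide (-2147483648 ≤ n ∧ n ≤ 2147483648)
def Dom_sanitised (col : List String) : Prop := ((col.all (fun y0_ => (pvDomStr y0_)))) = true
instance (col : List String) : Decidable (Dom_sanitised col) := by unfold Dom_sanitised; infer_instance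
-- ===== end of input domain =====

-- B replaces A's 13 sequential full-string str.replace passes with one explicit loop over
-- the characters (if/elif chain, accumulator list, single join). Return-value equivalence;
-- both A and B perform the same in-place mutation col[0] = sanitized in Python.

-- ===== PORT A =====
-- A's replace_dict, in its insertion order
def pvReplaceDict : List (String × String) :=
  [("%", "percent"), ("(", ""), (")", ""), (",", ""), (":", ""), ("-", ""),
   ("$", "D"), (".", ""), ("/", ""), ("=", ""), ("&", ""), (" ", "_"), ("\"", "")]

def sanitised (col : List String) : String × List String × (List (String × String)) :=
  match col with
  | [] => ("", [], [])  -- Python falls through the loop and returns None here; excluded by Pre_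
  | attr0 :: rest =>
    -- the first iteration of the for-loop ends in the early 'return', so only col[0] is processed
    let attr := pvReplaceDict.foldl (fun a kv => PySem.Str.replace a kv.1 kv.2) attr0
    let col' := attr :: rest
    (((PySem.List.pyGet? col' 0).getD ""),
     PySem.List.slice col' (some 1) none,
     [(attr, attr0)])

-- ===== PORT B =====
-- B's loop body: the if/elif chain appending the replacement piece(s) to the accumulator
def pvStep (acc : List String) (c : Char) : List String :=
  if c == '%' then acc ++ ["percent"]
  else if c == '$' then acc ++ ["D"]
  else if c == ' ' then acc ++ ["_"]
  else if "(),:-./=&\"".toList.contains c then acc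
  else acc ++ [String.ofList [c]]

def sanitised_alt (col : List String) : String × List String × (List (String × String)) :=
  match col with
  | [] => ("", [], [])  -- Python B raises IndexError on col[0] here; excluded by Pre_
  | original :: rest =>
    let out := original.toList.foldl pvStep []
    let sanitized := PySem.Str.join "" out
    (sanitized, rest, [(sanitized, original)])

-- ===== PRECONDITION & SPEC =====
-- Pre_ excludes only the empty list, on which A falls through its loop and returns None
-- (not a value of the declared tuple type) while B raises IndexError on col[0].
def Pre_sanitised (col : List String) : Prop := col ≠ []
instance (col : List String) : Decidable (Pre_sanitised col) := by unfold Pre_sanitised; infer_instance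
def pvWitness_sanitised : List String := ["Rate (%) - a.b", "keep me"]

def Spec_sanitised (col : List String) (out : String × List String × (List (String × String))) : Prop := out = sanitised_alt col
instance (col : List String) (out : String × List String × (List (String × String))) : Decidable (Spec_sanitised col out) := by unfold Spec_sanitised; infer_instance

-- ===== CLAIM (what is proved, stated in full; the proofs are below) =====
def Claim_equal_sanitised : Prop := ∀ (col : List String), Dom_sanitised col → Pre_sanitised col → Spec_sanitised col (sanitised col)

-- ===== LEMMAS AND PROOFS =====

-- a single-character substitution, as a per-character function
def pvSub (k : Char) (v : List Char) (c : Char) : List Char := if c == k then v else [c]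

-- A's 13 chained replaces, at the character-list level
def pvChain (l : List Char) : List Char :=
  ((((((((((((l.flatMap (pvSub '%' "percent".toList)).flatMap (pvSub '(' "".toList)).flatMap
    (pvSub ')' "".toList)).flatMap (pvSub ',' "".toList)).flatMap (pvSub ':' "".toList)).flatMap
    (pvSub '-' "".toList)).flatMap (pvSub '$' "D".toList)).flatMap (pvSub '.' "".toList)).flatMap
    (pvSub '/' "".toList)).flatMap (pvSub '=' "".toList)).flatMap (pvSub '&' "".toList)).flatMap
    (pvSub ' ' "_".toList)).flatMap (pvSub '"' "".toList)

-- B's loop body's contribution for one character, as a list of string pieces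
def pvPiece (c : Char) : List String :=
  if c == '%' then ["percent"]
  else if c == '$' then ["D"]
  else if c == ' ' then ["_"]
  else if "(),:-./=&\"".toList.contains c then []
  else [String.ofList [c]]

theorem pv_go_single (k : Char) (new : List Char) :
    ∀ (l : List Char) (fuel : Nat) (acc : List Char), l.length ≤ fuel →
      PySem.Chars.replace.go [k] new fuel l acc
        = acc.reverse ++ l.flatMap (pvSub k new) := by
  intro l
  induction l with
  | nil =>
    intro fuel acc _
    cases fuel <;> simp [PySem.Chars.replace.go]
  | cons c t ih =>
    intro fuel acc h
    cases fuel with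
    | zero => simp at h
    | succ n =>
      simp only [PySem.Chars.replace.go]
      by_cases hc : c = k
      · subst hc
        have hp : List.isPrefixOf [c] (c :: t) = true := by simp [List.isPrefixOf]
        rw [hp]
        simp only [if_true, List.length_cons, List.length_nil, List.drop_succ_cons, List.drop_zero]
        rw [ih n (new.reverse ++ acc) (by simpa using Nat.succ_le_succ_iff.mp h)]
        simp [pvSub]
      · have hp : List.isPrefixOf [k] (c :: t) = false := by
          simp [List.isPrefixOf]
          intro h'
          exact absurd h'.symm hc
        rw [hp]
        simp only [Bool.false_eq_true, if_false]
        rw [ih n (c :: acc) (by simpa using Nat.succ_le_succ_iff.mp h)]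
        simp [pvSub, hc]

theorem pv_replace_single (k : Char) (new s : List Char) :
    PySem.Chars.replace s [k] new = s.flatMap (pvSub k new) := by
  rw [PySem.Chars.replace]
  simp only [List.isEmpty_cons]
  exact pv_go_single k new s s.length [] le_rfl

-- A's chained replaces agree with B's piece function on one character
theorem pv_char_eq (c : Char) :
    pvChain [c] = ((pvPiece c).map String.toList).flatten := by
  by_cases h1 : c = '%'; · subst h1; decide
  by_cases h2 : c = '('; · subst h2; decide
  by_cases h3 : c = ')'; · subst h3; decide
  by_cases h4 : c = ','; · subst h4; decide
  by_cases h5 : c = ':'; · subst h5; decide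
  by_cases h6 : c = '-'; · subst h6; decide
  by_cases h7 : c = '$'; · subst h7; decide
  by_cases h8 : c = '.'; · subst h8; decide
  by_cases h9 : c = '/'; · subst h9; decide
  by_cases h10 : c = '='; · subst h10; decide
  by_cases h11 : c = '&'; · subst h11; decide
  by_cases h12 : c = ' '; · subst h12; decide
  by_cases h13 : c = '"'; · subst h13; decide
  simp [pvChain, pvSub, pvPiece, String.toList_ofList,
    h1, h2, h3, h4, h5, h6, h7, h8, h9, h10, h11, h12, h13]

theorem pvChain_append (a b : List Char) : pvChain (a ++ b) = pvChain a ++ pvChain b := by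
  simp [pvChain]

theorem pvChain_eq (l : List Char) :
    pvChain l = l.flatMap (fun c => ((pvPiece c).map String.toList).flatten) := by
  induction l with
  | nil => simp [pvChain]
  | cons c t ih =>
    have : c :: t = [c] ++ t := rfl
    rw [this, pvChain_append, pv_char_eq, ih]
    simp

-- B's foldl accumulates exactly the concatenation of the per-character pieces
theorem pv_foldl_pieces : ∀ (l : List Char) (acc : List String),
    l.foldl pvStep acc = acc ++ l.flatMap pvPiece := by
  intro l
  induction l with
  | nil => simp
  | cons c t ih =>
    intro acc
    simp only [List.foldl_cons, List.flatMap_cons, ih]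
    unfold pvStep pvPiece
    split_ifs <;> simp

theorem pv_join_flatten (L : List (List Char)) : PySem.Chars.join [] L = L.flatten := by
  induction L with
  | nil => simp [PySem.Chars.join_nil]
  | cons a r ih => cases r <;> simp_all [PySem.Chars.join_singleton, PySem.Chars.join_cons_cons]

theorem pv_string_eq (s : String) :
    pvReplaceDict.foldl (fun a kv => PySem.Str.replace a kv.1 kv.2) s
      = PySem.Str.join "" (s.toList.foldl pvStep []) := by
  rw [← String.toList_inj]
  rw [PySem.Str.toList_join, show ("" : String).toList = [] from rfl, pv_join_flatten,
      pv_foldl_pieces]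
  simp only [pvReplaceDict, List.foldl]
  simp only [PySem.Str.toList_replace]
  rw [show ("%" : String).toList = ['%'] from rfl, show ("(" : String).toList = ['('] from rfl,
     show (")" : String).toList = [')'] from rfl, show ("," : String).toList = [','] from rfl,
     show (":" : String).toList = [':'] from rfl, show ("-" : String).toList = ['-'] from rfl,
     show ("$" : String).toList = ['$'] from rfl, show ("." : String).toList = ['.'] from rfl,
     show ("/" : String).toList = ['/'] from rfl, show ("=" : String).toList = ['='] from rfl,
     show ("&" : String).toList = ['&'] from rfl, show (" " : String).toList = [' '] from rfl,
     show ("\"" : String).toList = ['"'] from rfl]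
  simp only [pv_replace_single]
  rw [show ∀ l : List Char,
        ((((((((((((l.flatMap (pvSub '%' "percent".toList)).flatMap (pvSub '(' "".toList)).flatMap
          (pvSub ')' "".toList)).flatMap (pvSub ',' "".toList)).flatMap (pvSub ':' "".toList)).flatMap
          (pvSub '-' "".toList)).flatMap (pvSub '$' "D".toList)).flatMap (pvSub '.' "".toList)).flatMap
          (pvSub '/' "".toList)).flatMap (pvSub '=' "".toList)).flatMap (pvSub '&' "".toList)).flatMap
          (pvSub ' ' "_".toList)).flatMap (pvSub '"' "".toList) = pvChain l
      from fun _ => rfl]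
  rw [pvChain_eq]
  simp [List.flatMap_def, Function.comp_def, List.flatten_flatten]

-- ===== VERDICT (by name: the statement is the Claim_ definition above) =====
theorem sanitised_spec : Claim_equal_sanitised := by
  intro col _ hpre
  unfold Spec_sanitised
  match col with
  | [] => exact absurd rfl hpre
  | a0 :: rest =>
    simp only [sanitised, sanitised_alt]
    rw [pv_string_eq a0]
    simp [PySem.List.slice_from_one, PySem.List.pyGet?, PySem.List.pyIdx?]
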